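-- pv_equiv track=rewrite | github.com/HaowenWeiJohn/CS534_AI | Assignment2/game.py | scoreTrick
-- ===== SOURCE A (Python) =====
-- def scoreTrick(trick):
--     # Score the trick and add the score to the winning player
--     # Get the suit led
--     suit = trick[0][0]
--     value = trick[0][1]
--     winner = 0
--     score = 0
--     # Determine who won (trick position not player!)
--     for i in range(len(trick) - 1):
--         if trick[i + 1][0] == suit and trick[i + 1][1] > value:
--             winner = i + 1
--             value = trick[i + 1][1]
--     # Determine the score
--     # Separate the suit and value tuples
--     suits_list = list(zip(*trick))[0]
--     if suits_list.count('T') == 0: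
--         # No Trolls, go ahead and score the unicorns
--         score += suits_list.count('U') * 3
--     score += suits_list.count('F') * 2
--     n_zomb = suits_list.count('Z')
--     score -= n_zomb
--     return winner, score, n_zomb  # Index of winning card
-- ===== SOURCE B (Python) =====
-- def scoreTrick(trick):
--     # Single pass: accumulate suit counters and track the winning card together.
--     suit = trick[0][0]
--     value = trick[0][1]
--     winner = 0
--     t = u = f = z = 0
--     for i, (s, v) in enumerate(trick):
--         if s == 'T':
--             t += 1
--         elif s == 'U':
--             u += 1
--         elif s == 'F':
--             f += 1
--         elif s == 'Z':
--             z += 1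
--         if i > 0 and s == suit and v > value:
--             winner = i
--             value = v
--     score = (u * 3 if t == 0 else 0) + f * 2 - z
--     return winner, score, z
-- ===== Notes on version B (the rewrite author's own statement) =====
-- stated objective: alternative
-- what changed: Replaced the separate winner loop plus zip(*) and four .count scans by a single enumerate pass that accumulates scalar suit counters and the winning position together.
-- outside the precondition, e.g. on scoreTrick([]): A raises IndexError, B raises IndexError
import Mathlib
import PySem

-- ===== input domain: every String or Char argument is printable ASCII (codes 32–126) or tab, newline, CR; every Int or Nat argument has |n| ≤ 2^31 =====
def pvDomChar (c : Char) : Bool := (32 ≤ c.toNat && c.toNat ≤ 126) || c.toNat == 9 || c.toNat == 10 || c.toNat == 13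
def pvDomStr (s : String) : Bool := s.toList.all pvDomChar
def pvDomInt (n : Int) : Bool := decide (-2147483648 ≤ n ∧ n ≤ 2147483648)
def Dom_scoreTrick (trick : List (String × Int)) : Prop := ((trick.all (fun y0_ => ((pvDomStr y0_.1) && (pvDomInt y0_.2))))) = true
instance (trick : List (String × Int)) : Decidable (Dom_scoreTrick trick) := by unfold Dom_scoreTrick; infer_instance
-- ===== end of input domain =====

-- B replaces A's winner loop plus zip(*) and four .count scans by one enumerate pass
-- with scalar counters (objective: alternative, same O(n) cost).

-- ===== PORT A =====
def scoreTrick (trick : List (String × Int)) : Int × Int × Int :=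
  match trick with
  | [] => (0, 0, 0)  -- Python raises IndexError here; excluded by Pre_
  | (suit, value0) :: _ =>
    let wv : Int × Int :=
      (PySem.List.pyRange 0 ((trick.length : Int) - 1) 1).foldl
        (fun st i =>
          -- trick[i+1]: the index is always in range, so pyGetD never hits its default
          let c := PySem.List.pyGetD trick (i + 1) ("", 0)
          if c.1 = suit ∧ c.2 > st.2 then (i + 1, c.2) else st)
        (0, value0)
    let suits := trick.map Prod.fst   -- list(zip(*trick))[0]: exact for nonempty trick
    let score1 : Int :=
      if PySem.List.count suits "T" = 0 then (PySem.List.count suits "U" : Int) * 3 else 0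
    let score2 : Int := score1 + (PySem.List.count suits "F" : Int) * 2
    let nZomb : Int := (PySem.List.count suits "Z" : Int)
    (wv.1, score2 - nZomb, nZomb)

-- ===== PORT B =====
def scoreTrick_alt (trick : List (String × Int)) : Int × Int × Int :=
  match trick with
  | [] => (0, 0, 0)  -- Python raises IndexError here; excluded by Pre_
  | (suit, value0) :: _ =>
    let st :=
      (PySem.List.enumerate trick 0).foldl
        (fun (st : Int × Int × Int × Int × Int × Int) p =>
          let (w, v, t, u, f, z) := st
          let (i, s, x) := p
          let (t, u, f, z) :=
            if s = "T" then (t + 1, u, f, z)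
            else if s = "U" then (t, u + 1, f, z)
            else if s = "F" then (t, u, f + 1, z)
            else if s = "Z" then (t, u, f, z + 1)
            else (t, u, f, z)
          if i > 0 ∧ s = suit ∧ x > v then (i, x, t, u, f, z) else (w, v, t, u, f, z))
        (0, value0, 0, 0, 0, 0)
    let (w, _, t, u, f, z) := st
    (w, (if t = 0 then u * 3 else 0) + f * 2 - z, z)

-- ===== PRECONDITION & SPEC =====
-- Pre_ excludes only the empty trick, on which A raises IndexError (trick[0]).
def Pre_scoreTrick (trick : List (String × Int)) : Prop := trick ≠ []
instance (trick : List (String × Int)) : Decidable (Pre_scoreTrick trick) := by unfold Pre_scoreTrick; infer_instance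
def pvWitness_scoreTrick : (List (String × Int)) := [("U", 3), ("U", 5), ("Z", 2)]
def Spec_scoreTrick (trick : List (String × Int)) (out : Int × Int × Int) : Prop := out = scoreTrick_alt trick
instance (trick : List (String × Int)) (out : Int × Int × Int) : Decidable (Spec_scoreTrick trick out) := by unfold Spec_scoreTrick; infer_instance

-- ===== CLAIM (what is proved, stated in full; the proofs are below) =====
def Claim_equal_scoreTrick : Prop := ∀ (trick : List (String × Int)), Dom_scoreTrick trick → Pre_scoreTrick trick → Spec_scoreTrick trick (scoreTrick trick)

-- ===== LEMMAS AND PROOFS =====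

-- winner step over an enumerated card (position recorded as index + 1)
def stepW (suit : String) (st : Int × Int) (p : Int × String × Int) : Int × Int :=
  if p.2.1 = suit ∧ p.2.2 > st.2 then (p.1 + 1, p.2.2) else st

-- B's loop body over an enumerated card with the 'i > 0' guard already discharged
def stepB (suit : String) (st : Int × Int × Int × Int × Int × Int)
    (p : Int × String × Int) : Int × Int × Int × Int × Int × Int :=
  let (w, v, t, u, f, z) := st
  let (t, u, f, z) :=
    if p.2.1 = "T" then (t + 1, u, f, z)
    else if p.2.1 = "U" then (t, u + 1, f, z)
    else if p.2.1 = "F" then (t, u, f + 1, z)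
    else if p.2.1 = "Z" then (t, u, f, z + 1)
    else (t, u, f, z)
  if p.2.1 = suit ∧ p.2.2 > v then (p.1 + 1, p.2.2, t, u, f, z) else (w, v, t, u, f, z)

theorem enumerate_shift {α : Type} (xs : List α) (s : Int) :
    PySem.List.enumerate xs (s + 1) = (PySem.List.enumerate xs s).map (fun p => (p.1 + 1, p.2)) := by
  induction xs generalizing s with
  | nil => simp [PySem.List.enumerate_nil]
  | cons h t ih => simp [PySem.List.enumerate_cons, ih]

theorem proj_lemma (suit : String) (ps : List (Int × String × Int))
    (w v t u f z : Int) :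
    ps.foldl (stepB suit) (w, v, t, u, f, z)
      = ((ps.foldl (stepW suit) (w, v)).1, (ps.foldl (stepW suit) (w, v)).2,
         t + ((ps.map (fun p => p.2.1)).count "T" : Int),
         u + ((ps.map (fun p => p.2.1)).count "U" : Int),
         f + ((ps.map (fun p => p.2.1)).count "F" : Int),
         z + ((ps.map (fun p => p.2.1)).count "Z" : Int)) := by
  induction ps generalizing w v t u f z with
  | nil => simp
  | cons p ps ih =>
    obtain ⟨i, s, x⟩ := p
    simp only [List.foldl_cons, List.map_cons, List.count_cons, stepB, stepW]
    split_ifs <;> rw [ih] <;> push_cast <;> simp_all <;> omega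

theorem pyGetD_cons_succ {α : Type} (a : α) (xs : List α) (i : Int) (d : α) (h : 0 ≤ i) :
    PySem.List.pyGetD (a :: xs) (i + 1) d = PySem.List.pyGetD xs i d := by
  rw [PySem.List.pyGetD_of_nonneg _ _ (by omega), PySem.List.pyGetD_of_nonneg _ _ h]
  have hn : (i + 1).toNat = i.toNat + 1 := by omega
  simp [hn]

theorem enum_suits {α β : Type} (xs : List (α × β)) (s : Int) :
    (PySem.List.enumerate xs s).map (fun p => p.2.1) = xs.map Prod.fst := by
  induction xs generalizing s with
  | nil => simp [PySem.List.enumerate_nil]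
  | cons h t ih => simp [PySem.List.enumerate_cons, ih]

theorem afold_eq (suit : String) (v0 : Int) (tl : List (String × Int)) :
    (PySem.List.pyRange 0 (((((suit, v0) :: tl).length : Int)) - 1) 1).foldl
        (fun st i =>
          let c := PySem.List.pyGetD ((suit, v0) :: tl) (i + 1) ("", 0)
          if c.1 = suit ∧ c.2 > st.2 then (i + 1, c.2) else st)
        ((0 : Int), v0)
      = (PySem.List.enumerate tl 0).foldl (stepW suit) (0, v0) := by
  have hb : ((((suit, v0) :: tl).length : Int)) - 1 = PySem.List.len tl := by
    simp [PySem.List.len_eq]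
  rw [hb, PySem.List.enumerate_eq_map_pyRange tl ("", 0), List.foldl_map]
  apply PySem.List.foldl_congr_mem
  intro acc i hi
  have h0 : 0 ≤ i := (PySem.List.mem_pyRange_one.1 hi).1
  simp only [pyGetD_cons_succ _ _ _ _ h0, stepW]

-- verbatim copy of the loop body of scoreTrick_alt (used only to name the fold in proofs)
def stepBG (suit : String) (st : Int × Int × Int × Int × Int × Int)
    (p : Int × String × Int) : Int × Int × Int × Int × Int × Int :=
  let (w, v, t, u, f, z) := st
  let (i, s, x) := p
  let (t, u, f, z) :=
    if s = "T" then (t + 1, u, f, z)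
    else if s = "U" then (t, u + 1, f, z)
    else if s = "F" then (t, u, f + 1, z)
    else if s = "Z" then (t, u, f, z + 1)
    else (t, u, f, z)
  if i > 0 ∧ s = suit ∧ x > v then (i, x, t, u, f, z) else (w, v, t, u, f, z)

theorem alt_eq (suit : String) (v0 : Int) (tl : List (String × Int)) :
    scoreTrick_alt ((suit, v0) :: tl)
      = (let st := (PySem.List.enumerate ((suit, v0) :: tl) 0).foldl (stepBG suit)
           (0, v0, 0, 0, 0, 0)
         let (w, _, t, u, f, z) := st
         (w, (if t = 0 then u * 3 else 0) + f * 2 - z, z)) := rfl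

theorem bfold_eq (suit : String) (v0 : Int) (tl : List (String × Int)) :
    (PySem.List.enumerate ((suit, v0) :: tl) 0).foldl (stepBG suit) (0, v0, 0, 0, 0, 0)
      = (((PySem.List.enumerate tl 0).foldl (stepW suit) (0, v0)).1,
         ((PySem.List.enumerate tl 0).foldl (stepW suit) (0, v0)).2,
         (if suit = "T" then 1 else 0) + (((tl.map Prod.fst).count "T" : Int)),
         (if suit = "U" then 1 else 0) + (((tl.map Prod.fst).count "U" : Int)),
         (if suit = "F" then 1 else 0) + (((tl.map Prod.fst).count "F" : Int)),
         (if suit = "Z" then 1 else 0) + (((tl.map Prod.fst).count "Z" : Int))) := by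
  rw [PySem.List.enumerate_cons, List.foldl_cons]
  have h1 : stepBG suit (0, v0, 0, 0, 0, 0) (0, suit, v0)
      = (0, v0, (if suit = "T" then 1 else 0), (if suit = "U" then 1 else 0),
         (if suit = "F" then 1 else 0), (if suit = "Z" then 1 else 0)) := by
    simp [stepBG]
    split_ifs <;> simp_all
  rw [h1, enumerate_shift, List.foldl_map]
  rw [PySem.List.foldl_congr_mem _ _ (stepB suit) _ ?hcong]
  case hcong =>
    intro acc p hp
    obtain ⟨k, hk, rfl⟩ := (PySem.List.mem_enumerate_iff tl 0 p).1 hp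
    simp [stepBG, stepB]
  rw [proj_lemma, enum_suits]

theorem scoreTrick_spec : Claim_equal_scoreTrick := by
  intro trick _ hpre
  unfold Spec_scoreTrick
  cases trick with
  | nil => exact absurd rfl hpre
  | cons hd tl =>
    obtain ⟨suit, v0⟩ := hd
    rw [alt_eq, bfold_eq]
    simp only [scoreTrick]
    rw [afold_eq]
    simp only [PySem.List.count_eq, List.map_cons, List.count_cons, beq_iff_eq]
    split_ifs <;> push_cast <;> simp_all <;> omega
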